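-- pv_equiv track=rewrite | github.com/nascarsayan/lintcode | 884.py | findPermutation
-- ===== SOURCE A (Python) =====
-- def findPermutation(s):
--   # write your code here
--   size = len(s)
--   nums = list(range(1, size + 2))
--   nexi = s.find('I')
--   if nexi < 0:
--     return list(nums[::-1])
--   ptr = -1
--   per = []
--   while (len(nums) > 0):
--     st = s.find('I', ptr + 1)
--     if st == -1:
--       per.extend(nums[::-1])
--       break
--     chunk = []
--     while (ptr < st):
--       chunk.append(nums.pop(0))
--       ptr += 1
--     per.extend(chunk[::-1])
--   return per
-- ===== SOURCE B (Python) =====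
-- def findPermutation(s):
--     # One pass over s: each maximal run of non-'I' characters ending at an 'I' (and the
--     # final tail) delimits a descending chunk, emitted directly with a countdown range.
--     res = []
--     start = 0
--     for i, c in enumerate(s):
--         if c == 'I':
--             res.extend(range(i + 1, start, -1))
--             start = i + 1
--     res.extend(range(len(s) + 1, start, -1))
--     return res
-- ===== Notes on version B (the rewrite author's own statement) =====
-- stated objective: alternative
-- what changed: A repeatedly re-scans the string with s.find and pops nums from the front (pop(0)) chunk by chunk; B does one enumerate pass and emits each descending run directly as a countdown range, so no number list is materialised or shifted (intended as faster, O(n) vs A's quadratic pop(0) chunking, but a timing run measured only 1.24x at its largest size, so no speed is claimed).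
import Mathlib
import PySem

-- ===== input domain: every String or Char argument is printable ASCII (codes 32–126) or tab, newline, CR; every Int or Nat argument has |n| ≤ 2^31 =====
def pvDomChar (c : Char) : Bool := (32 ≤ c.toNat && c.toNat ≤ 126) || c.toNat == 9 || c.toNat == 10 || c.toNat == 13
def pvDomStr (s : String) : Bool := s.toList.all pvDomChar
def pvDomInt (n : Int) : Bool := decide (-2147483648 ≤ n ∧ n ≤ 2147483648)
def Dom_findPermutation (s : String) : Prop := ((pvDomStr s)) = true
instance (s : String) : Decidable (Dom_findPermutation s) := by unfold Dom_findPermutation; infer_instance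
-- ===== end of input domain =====

-- B replaces A's repeated s.find scans and pop(0) chunking with a single
-- left-to-right pass that emits each descending run as a countdown range
-- (objective: an alternative one-pass algorithm).

-- ===== PORT A =====
-- inner while of A: `while ptr < st: chunk.append(nums.pop(0)); ptr += 1`
-- (the [] branch is where Python's pop(0) would raise IndexError; never reached from A's entry)
def chunkLoopA (nums : List Int) (ptr st : Int) (chunk : List Int) :
    List Int × List Int × Int :=
  if ptr < st then
    match nums with
    | [] => (chunk, [], ptr)
    | x :: rest => chunkLoopA rest (ptr + 1) st (chunk ++ [x])
  else (chunk, nums, ptr)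
termination_by (st - ptr).toNat
decreasing_by omega

-- outer while of A: `while len(nums) > 0: …`; the Python locals st / chunk are inlined.
-- The `hlt` guard only makes the recursion total: on states where the popped chunk is
-- empty Python's while would not terminate, and A's entry never reaches such a state.
def loopA (s : String) (nums : List Int) (ptr : Int) (per : List Int) : List Int :=
  if 0 < nums.length then
    if PySem.Str.findFrom s "I" (ptr + 1) none = -1 then
      per ++ (PySem.List.slice? nums none none (-1)).getD []
    else
      if hlt : (chunkLoopA nums ptr (PySem.Str.findFrom s "I" (ptr + 1) none) []).2.1.length < nums.length then
        loopA s (chunkLoopA nums ptr (PySem.Str.findFrom s "I" (ptr + 1) none) []).2.1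
          (chunkLoopA nums ptr (PySem.Str.findFrom s "I" (ptr + 1) none) []).2.2
          (per ++ (PySem.List.slice? (chunkLoopA nums ptr (PySem.Str.findFrom s "I" (ptr + 1) none) []).1 none none (-1)).getD [])
      else
        per ++ (PySem.List.slice? (chunkLoopA nums ptr (PySem.Str.findFrom s "I" (ptr + 1) none) []).1 none none (-1)).getD []
  else per
termination_by nums.length
decreasing_by exact hlt

def findPermutation (s : String) : List Int :=
  if PySem.Str.find s "I" < 0 then
    (PySem.List.slice? (PySem.List.pyRange 1 (PySem.Str.len s + 2) 1) none none (-1)).getD []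
  else loopA s (PySem.List.pyRange 1 (PySem.Str.len s + 2) 1) (-1) []

-- ===== PORT B =====
def findPermutation_alt (s : String) : List Int :=
  let r := (PySem.List.enumerate s.toList 0).foldl
    (fun (acc : List Int × Int) p =>
      if p.2 = 'I' then (acc.1 ++ PySem.List.pyRange (p.1 + 1) acc.2 (-1), p.1 + 1)
      else acc)
    ([], 0)
  r.1 ++ PySem.List.pyRange (PySem.Str.len s + 1) r.2 (-1)

-- ===== PRECONDITION & SPEC =====
def Spec_findPermutation (s : String) (out : List Int) : Prop := out = findPermutation_alt s
instance (s : String) (out : List Int) : Decidable (Spec_findPermutation s out) := by unfold Spec_findPermutation; infer_instance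

-- ===== CLAIM (what is proved, stated in full; the proofs are below) =====
def Claim_equal_findPermutation : Prop := ∀ (s : String), Dom_findPermutation s → Spec_findPermutation s (findPermutation s)

-- ===== LEMMAS AND PROOFS =====

-- common specification: scan the remaining characters, k = absolute index of the
-- next character, start = index boundary of the current descending chunk
def gSpec : List Char → Int → Int → List Int
  | [], k, start => PySem.List.pyRange (k + 1) start (-1)
  | c :: rest, k, start =>
      if c = 'I' then
        PySem.List.pyRange (k + 1) start (-1) ++ gSpec rest (k + 1) (k + 1)
      else gSpec rest (k + 1) start

theorem gSpec_no_I (cs : List Char) (h : 'I' ∉ cs) (k start : Int) :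
    gSpec cs k start = PySem.List.pyRange (k + cs.length + 1) start (-1) := by
  induction cs generalizing k with
  | nil => simp [gSpec]
  | cons c rest ih =>
    simp only [List.mem_cons, not_or] at h
    have hc : ¬ (c = 'I') := fun h' => h.1 h'.symm
    simp only [gSpec, if_neg hc, ih h.2 (k + 1)]
    rw [show k + ((c :: rest).length : Int) + 1 = k + 1 + (rest.length : Int) + 1 by
      simp only [List.length_cons]; push_cast; ring]

theorem gSpec_of_find (l : List Char) (j : Nat) (k start : Int) (hj : j < l.length)
    (hget : l[j]? = some 'I') (hmin : ∀ i, i < j → l[i]? ≠ some 'I') :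
    gSpec l k start =
      PySem.List.pyRange (k + j + 1) start (-1) ++
        gSpec (l.drop (j + 1)) (k + j + 1) (k + j + 1) := by
  induction l generalizing j k with
  | nil => simp at hj
  | cons c rest ih =>
    cases j with
    | zero =>
      simp only [List.getElem?_cons_zero, Option.some.injEq] at hget
      simp [gSpec, hget]
    | succ i =>
      have hc : ¬ (c = 'I') := by
        have := hmin 0 (Nat.succ_pos i)
        simpa using this
      simp only [gSpec, if_neg hc]
      have hget' : rest[i]? = some 'I' := by simpa using hget
      have hj' : i < rest.length := by simpa [Nat.succ_lt_succ_iff] using hj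
      have hmin' : ∀ i', i' < i → rest[i']? ≠ some 'I' := by
        intro i' hi'
        have := hmin (i' + 1) (by omega)
        simpa using this
      rw [ih i (k + 1) hj' hget' hmin']
      rw [show k + ((i + 1 : Nat) : Int) + 1 = k + 1 + (i : Int) + 1 by push_cast; ring]
      simp only [List.drop_succ_cons]

theorem chunkLoopA_spec (m : Nat) (nums : List Int) (ptr : Int) (chunk : List Int)
    (hlen : m ≤ nums.length) :
    chunkLoopA nums ptr (ptr + (m : Int)) chunk =
      (chunk ++ nums.take m, nums.drop m, ptr + (m : Int)) := by
  induction m generalizing nums ptr chunk with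
  | zero => rw [chunkLoopA.eq_def]; simp
  | succ n ih =>
    obtain ⟨x, rest, rfl⟩ : ∃ x rest, nums = x :: rest := by
      cases nums with
      | nil => simp at hlen
      | cons a b => exact ⟨a, b, rfl⟩
    rw [chunkLoopA.eq_def]
    rw [if_pos (show ptr < ptr + ((n + 1 : Nat) : Int) by push_cast; omega)]
    have hst : (ptr : Int) + ((n + 1 : Nat) : Int) = (ptr + 1) + (n : Int) := by
      push_cast; ring
    rw [hst]
    change chunkLoopA rest (ptr + 1) (ptr + 1 + (n : Int)) (chunk ++ [x]) = _
    rw [ih rest (ptr + 1) (chunk ++ [x]) (by simpa using Nat.le_of_succ_le_succ hlen)]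
    simp only [List.take_succ_cons, List.drop_succ_cons, List.append_assoc,
      List.singleton_append]

theorem loopA_eq (s : String) :
    ∀ (n k : Nat), s.toList.length - k = n → k ≤ s.toList.length → ∀ per : List Int,
      loopA s (PySem.List.pyRange ((k : Int) + 1) ((s.toList.length : Int) + 2) 1)
          ((k : Int) - 1) per
        = per ++ gSpec (s.toList.drop k) (k : Int) (k : Int) := by
  intro n
  induction n using Nat.strong_induction_on with
  | _ n ih =>
    intro k hn hk per
    have hpos : 0 < (PySem.List.pyRange ((k : Int) + 1) ((s.toList.length : Int) + 2) 1).length := by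
      rw [PySem.List.length_pyRange_one]; omega
    rw [loopA, if_pos hpos]
    have hst : PySem.Str.findFrom s "I" ((k : Int) - 1 + 1) none
        = if PySem.Chars.find (s.toList.drop k) "I".toList = -1 then -1
          else (k : Int) + PySem.Chars.find (s.toList.drop k) "I".toList := by
      rw [show (k : Int) - 1 + 1 = (k : Int) by ring, PySem.Str.findFrom_eq]
      exact PySem.Chars.findFrom_natCast s.toList "I".toList k hk
    rw [hst]
    by_cases hI : 'I' ∈ s.toList.drop k
    · -- an 'I' remains: A pops one chunk and recurses
      have hinf : "I".toList <:+: s.toList.drop k := by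
        rw [show "I".toList = ['I'] by decide]
        exact (List.singleton_infix_iff _ _).mpr hI
      have hf0 : 0 ≤ PySem.Chars.find (s.toList.drop k) "I".toList :=
        (PySem.Chars.find_nonneg_iff _ _).mpr hinf
      have hfne : ¬ (PySem.Chars.find (s.toList.drop k) "I".toList = -1) := by omega
      rw [if_neg hfne]
      rw [if_neg (show ¬ ((k : Int) + PySem.Chars.find (s.toList.drop k) "I".toList = -1) by omega)]
      have hspec := PySem.Chars.find_spec hf0
      obtain ⟨hpref, hminp⟩ := hspec
      -- j = local index of the first 'I' in the remaining characters
      have hfj : PySem.Chars.find (s.toList.drop k) "I".toList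
          = ((PySem.Chars.find (s.toList.drop k) "I".toList).toNat : Int) :=
        (Int.toNat_of_nonneg hf0).symm
      generalize hjdef : (PySem.Chars.find (s.toList.drop k) "I".toList).toNat = j at hfj hpref hminp
      rw [hfj]
      obtain ⟨t, ht⟩ := hpref
      rw [show "I".toList = ['I'] by decide] at ht hminp
      have hget : (s.toList.drop k)[j]? = some 'I' := by
        have := congrArg (fun x => x[0]?) ht
        simpa [List.getElem?_drop] using this.symm
      obtain ⟨hjlen, hgetE⟩ := List.getElem?_eq_some_iff.mp hget
      have hmin : ∀ i, i < j → (s.toList.drop k)[i]? ≠ some 'I' := by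
        intro i hi hcontra
        obtain ⟨hilen, hEq⟩ := List.getElem?_eq_some_iff.mp hcontra
        have hd := List.drop_eq_getElem_cons (l := s.toList.drop k) hilen
        exact hminp i hi ⟨(s.toList.drop k).drop (i + 1), by rw [hd, hEq]; simp⟩
      have hjL : k + j < s.toList.length := by
        have := List.length_drop (l := s.toList) (i := k)
        omega
      -- the popped chunk
      have est : (k : Int) + (j : Int) = ((k : Int) - 1) + ((j + 1 : Nat) : Int) := by
        push_cast; ring
      rw [est]
      have hlen' : j + 1 ≤ (PySem.List.pyRange ((k : Int) + 1) ((s.toList.length : Int) + 2) 1).length := by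
        rw [PySem.List.length_pyRange_one]; omega
      rw [chunkLoopA_spec (j + 1) _ _ _ hlen']
      have hsplit : PySem.List.pyRange ((k : Int) + 1) ((s.toList.length : Int) + 2) 1
          = PySem.List.pyRange ((k : Int) + 1) ((k : Int) + (j : Int) + 2) 1
            ++ PySem.List.pyRange ((k : Int) + (j : Int) + 2) ((s.toList.length : Int) + 2) 1 :=
        PySem.List.pyRange_one_append _ _ _ (by omega) (by omega)
      have hlen1 : (PySem.List.pyRange ((k : Int) + 1) ((k : Int) + (j : Int) + 2) 1).length = j + 1 := by
        rw [PySem.List.length_pyRange_one]; omega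
      have htake : (PySem.List.pyRange ((k : Int) + 1) ((s.toList.length : Int) + 2) 1).take (j + 1)
          = PySem.List.pyRange ((k : Int) + 1) ((k : Int) + (j : Int) + 2) 1 := by
        rw [hsplit, List.take_left' hlen1]
      have hdrop : (PySem.List.pyRange ((k : Int) + 1) ((s.toList.length : Int) + 2) 1).drop (j + 1)
          = PySem.List.pyRange ((k : Int) + (j : Int) + 2) ((s.toList.length : Int) + 2) 1 := by
        rw [hsplit, List.drop_left' hlen1]
      rw [htake, hdrop]
      have hltp : (PySem.List.pyRange ((k : Int) + (j : Int) + 2) ((s.toList.length : Int) + 2) 1).length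
          < (PySem.List.pyRange ((k : Int) + 1) ((s.toList.length : Int) + 2) 1).length := by
        rw [PySem.List.length_pyRange_one, PySem.List.length_pyRange_one]; omega
      rw [dif_pos hltp]
      -- the recursive call matches the invariant at k' = k + j + 1
      have e1 : (k : Int) + (j : Int) + 2 = (((k + j + 1 : Nat) : Int)) + 1 := by push_cast; ring
      have e2 : ((k : Int) - 1) + ((j + 1 : Nat) : Int) = (((k + j + 1 : Nat) : Int)) - 1 := by
        push_cast; ring
      rw [e1, e2]
      rw [ih (s.toList.length - (k + j + 1)) (by omega) (k + j + 1) rfl (by omega)]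
      -- chunk reversal
      rw [List.nil_append, PySem.List.slice?_none_none_neg_one, Option.getD_some]
      have hrev : (PySem.List.pyRange ((k : Int) + 1) (((k + j + 1 : Nat) : Int) + 1) 1).reverse
          = PySem.List.pyRange ((k : Int) + (j : Int) + 1) (k : Int) (-1) := by
        rw [PySem.List.pyRange_neg_one_eq_reverse]
        rw [show (k : Int) + (j : Int) + 1 + 1 = ((k + j + 1 : Nat) : Int) + 1 by push_cast; ring]
      rw [hrev]
      -- fold the right-hand side
      rw [gSpec_of_find (s.toList.drop k) j (k : Int) (k : Int) hjlen hget hmin]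
      have hidx : (s.toList.drop k).drop (j + 1) = s.toList.drop (k + j + 1) := by
        rw [List.drop_drop, ← Nat.add_assoc]
      rw [hidx]
      rw [show ((k + j + 1 : Nat) : Int) = (k : Int) + (j : Int) + 1 by push_cast; ring]
      rw [List.append_assoc]
    · -- no 'I' remains: A dumps the reversed tail
      have hf : PySem.Chars.find (s.toList.drop k) "I".toList = -1 := by
        rw [PySem.Chars.find_eq_neg_one_iff, show "I".toList = ['I'] by decide,
          List.singleton_infix_iff]
        exact hI
      rw [hf, if_pos rfl, if_pos rfl]
      rw [PySem.List.slice?_none_none_neg_one, Option.getD_some]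
      rw [gSpec_no_I _ hI, List.length_drop]
      rw [PySem.List.pyRange_neg_one_eq_reverse]
      rw [show (k : Int) + ((s.toList.length - k : Nat) : Int) + 1 + 1
            = (s.toList.length : Int) + 2 by omega]

theorem B_loop (cs : List Char) (k : Nat) (res : List Int) (start : Int) :
    ((PySem.List.enumerate cs (k : Int)).foldl
        (fun (acc : List Int × Int) p =>
          if p.2 = 'I' then (acc.1 ++ PySem.List.pyRange (p.1 + 1) acc.2 (-1), p.1 + 1)
          else acc) (res, start)).1
      ++ PySem.List.pyRange ((k : Int) + cs.length + 1)
          ((PySem.List.enumerate cs (k : Int)).foldl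
            (fun (acc : List Int × Int) p =>
              if p.2 = 'I' then (acc.1 ++ PySem.List.pyRange (p.1 + 1) acc.2 (-1), p.1 + 1)
              else acc) (res, start)).2 (-1)
    = res ++ gSpec cs (k : Int) start := by
  induction cs generalizing k res start with
  | nil => simp [gSpec, PySem.List.enumerate]
  | cons c rest ih =>
    rw [PySem.List.enumerate_cons, List.foldl_cons]
    by_cases hc : c = 'I'
    · subst hc
      have H := ih (k + 1) (res ++ PySem.List.pyRange ((k : Int) + 1) start (-1)) ((k : Int) + 1)
      push_cast at H
      simp only [gSpec, List.length_cons]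
      push_cast
      rw [show (k : Int) + ((rest.length : Int) + 1) + 1 = (k : Int) + 1 + (rest.length : Int) + 1 by ring]
      rw [← List.append_assoc]
      exact H
    · have H := ih (k + 1) res start
      push_cast at H
      simp only [gSpec, if_neg hc, List.length_cons]
      push_cast
      rw [show (k : Int) + ((rest.length : Int) + 1) + 1 = (k : Int) + 1 + (rest.length : Int) + 1 by ring]
      exact H

-- ===== VERDICT (by name: the statement is the Claim_ definition above) =====
theorem findPermutation_spec : Claim_equal_findPermutation := by
  unfold Claim_equal_findPermutation Spec_findPermutation
  intro s _
  have hB : findPermutation_alt s = gSpec s.toList 0 0 := by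
    unfold findPermutation_alt
    have H := B_loop s.toList 0 [] 0
    simp only [Nat.cast_zero, zero_add, List.nil_append] at H
    simp only [PySem.Str.len_eq]
    exact H
  rw [hB]
  unfold findPermutation
  by_cases hI : 'I' ∈ s.toList
  · have h0 : ¬ (PySem.Str.find s "I" < 0) := by
      have : 0 ≤ PySem.Str.find s "I" := by
        rw [PySem.Str.find_nonneg_iff, show "I".toList = ['I'] by decide,
          List.singleton_infix_iff]
        exact hI
      omega
    rw [if_neg h0]
    have H := loopA_eq s (s.toList.length) 0 (by omega) (by omega) []
    simp only [Nat.cast_zero, zero_add, zero_sub, List.drop_zero, List.nil_append] at H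
    simp only [PySem.Str.len_eq]
    exact H
  · have h0 : PySem.Str.find s "I" < 0 := by
      have : PySem.Str.find s "I" = -1 := by
        rw [PySem.Str.find_eq_neg_one_iff, show "I".toList = ['I'] by decide,
          List.singleton_infix_iff]
        exact hI
      omega
    rw [if_pos h0]
    rw [PySem.List.slice?_none_none_neg_one, Option.getD_some]
    rw [gSpec_no_I _ hI, PySem.List.pyRange_neg_one_eq_reverse]
    simp only [PySem.Str.len_eq]
    rw [show (0 : Int) + (s.toList.length : Int) + 1 + 1 = (s.toList.length : Int) + 2 by ring]
    rw [show (0 : Int) + 1 = 1 by ring]
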